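-- pv_equiv track=rewrite | github.com/mishmishb/PasswordWebsite | Cracker/word_extraction.py | generate_l33t_list
-- ===== SOURCE A (Python) =====
-- def generate_l33t_list(password, l33t_list):
--     ''' Inspects the non-alpha characters in the password and returns a list of
--     letters for potential character swaps'''
--
--     # Filters out letters from password
--     nonalpha = [a for a in password if not a.isalpha()]
--
--
--     swaps = {}
--     for n_a in nonalpha:
--         # Creates list of letters that might have been swapped
--         # for a non-alpha character
--         letters = [k for k, v in l33t_list.items() if n_a in v]
--         if letters:
--             swaps[n_a] = letters
--
--     # Returns dictionary of the non-alpha characters and their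
--     # corresponding letters as per l33t_list
--     return swaps
-- ===== SOURCE B (Python) =====
-- def generate_l33t_list(password, l33t_list):
--     ''' Inspects the non-alpha characters in the password and returns a list of
--     letters for potential character swaps'''
--
--     # Invert the l33t table once: each substitution character -> the letters
--     # whose lists contain it (letters kept in table order, one per entry).
--     index = {}
--     for k, v in l33t_list.items():
--         for c in dict.fromkeys(v):
--             index.setdefault(c, []).append(k)
--
--     # Each non-alpha password character is then a single dictionary lookup;
--     # first occurrence fixes the output position, later duplicates are skipped.
--     swaps = {}
--     for a in password:
--         if not a.isalpha() and a not in swaps and a in index: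
--             swaps[a] = index[a]
--     return swaps
-- ===== Notes on version B (the rewrite author's own statement) =====
-- stated objective: alternative
-- what changed: B first inverts the whole l33t table into an index (substitution char -> letters) built password-independently in one pass, then resolves each non-alpha password char by a single dictionary lookup, so A's per-character rescan of the table with membership tests disappears.
import Mathlib
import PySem

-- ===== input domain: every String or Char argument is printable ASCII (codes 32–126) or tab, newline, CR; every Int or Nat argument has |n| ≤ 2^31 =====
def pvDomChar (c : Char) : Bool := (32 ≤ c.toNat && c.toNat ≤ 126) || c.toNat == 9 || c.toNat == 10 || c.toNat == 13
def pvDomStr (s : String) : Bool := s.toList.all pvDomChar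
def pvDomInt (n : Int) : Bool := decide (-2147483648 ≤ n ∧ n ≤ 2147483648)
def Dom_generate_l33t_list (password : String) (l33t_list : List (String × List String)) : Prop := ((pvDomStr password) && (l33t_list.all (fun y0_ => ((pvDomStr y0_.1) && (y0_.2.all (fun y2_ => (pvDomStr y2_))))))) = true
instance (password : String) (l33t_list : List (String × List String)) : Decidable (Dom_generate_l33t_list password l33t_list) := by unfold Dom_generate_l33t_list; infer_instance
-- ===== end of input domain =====

-- B inverts the l33t table once into an index (substitution char → letters) and then resolves
-- each non-alpha password char by a single lookup, instead of A's rescan of the whole table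
-- with membership tests for every non-alpha password character (alternative decomposition).

-- ===== PORT A =====
def generate_l33t_list (password : String) (l33t_list : List (String × List String)) : List (String × List String) :=
  -- nonalpha = [a for a in password if not a.isalpha()]   (chars iterate as 1-char strings)
  let nonalpha : List String :=
    (password.toList.filter (fun a => !PySem.Chars.isalpha a)).map (fun a => String.mk [a])
  -- swaps = {}; for n_a in nonalpha: letters = [k for k, v in l33t_list.items() if n_a in v]; if letters: swaps[n_a] = letters
  let swaps : PySem.Dict String (List String) :=
    nonalpha.foldl (fun d n_a =>
      let letters := (l33t_list.filter (fun kv => kv.2.contains n_a)).map (fun kv => kv.1)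
      if letters ≠ [] then d.insert n_a letters else d) PySem.Dict.empty
  swaps.items

-- ===== PORT B =====
def generate_l33t_list_alt (password : String) (l33t_list : List (String × List String)) : List (String × List String) :=
  -- index = {}; for k, v in l33t_list.items(): for c in dict.fromkeys(v): index.setdefault(c, []).append(k)
  let index : PySem.Dict String (List String) :=
    l33t_list.foldl (fun d kv =>
      (PySem.List.dedup kv.2).foldl (fun d c => d.modify c [] (fun l => l ++ [kv.1])) d)
      PySem.Dict.empty
  -- swaps = {}; for a in password: if not a.isalpha() and a not in swaps and a in index: swaps[a] = index[a]
  let swaps : PySem.Dict String (List String) :=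
    password.toList.foldl (fun (d : PySem.Dict String (List String)) a =>
      let as := String.mk [a]
      if !PySem.Chars.isalpha a && !d.contains as && index.contains as
        then d.insert as (index.getD as []) else d) PySem.Dict.empty
  swaps.items

-- ===== PRECONDITION & SPEC =====
def Spec_generate_l33t_list (password : String) (l33t_list : List (String × List String)) (out : List (String × List String)) : Prop := out = generate_l33t_list_alt password l33t_list
instance (password : String) (l33t_list : List (String × List String)) (out : List (String × List String)) : Decidable (Spec_generate_l33t_list password l33t_list out) := by unfold Spec_generate_l33t_list; infer_instance

-- ===== CLAIM (what is proved, stated in full; the proofs are below) =====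
def Claim_equal_generate_l33t_list : Prop := ∀ (password : String) (l33t_list : List (String × List String)), Dom_generate_l33t_list password l33t_list → Spec_generate_l33t_list password l33t_list (generate_l33t_list password l33t_list)

-- ===== LEMMAS AND PROOFS =====

-- A's letters list for a character c.
def pvLetters (l33t_list : List (String × List String)) (c : String) : List String :=
  (l33t_list.filter (fun kv => kv.2.contains c)).map (fun kv => kv.1)

-- The inverted-index pair stream of the table.
def pvPairs (l33t_list : List (String × List String)) : List (String × String) :=
  l33t_list.flatMap (fun kv => (PySem.Set.ofList kv.2).map (fun c => (c, kv.1)))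

-- B's nested index loop is the fold of the pair stream.
theorem pv_index_eq_pairs_fold (L : List (String × List String))
    (d : PySem.Dict String (List String)) :
    L.foldl (fun d kv =>
        (PySem.List.dedup kv.2).foldl (fun d c => d.modify c [] (fun l => l ++ [kv.1])) d) d
    = (pvPairs L).foldl (fun d p => d.modify p.1 [] (fun l => l ++ [p.2])) d := by
  induction L generalizing d with
  | nil => rfl
  | cons kv L ih =>
    rw [List.foldl_cons, ih]
    simp only [pvPairs, List.flatMap_cons]
    rw [List.foldl_append, List.foldl_map, PySem.List.dedup_eq_ofList]

-- Filtering the pair stream at c recovers A's letters list.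
theorem pv_pairs_filter (L : List (String × List String)) (c : String) :
    ((pvPairs L).filter (fun p => p.1 == c)).map (fun p => p.2) = pvLetters L c := by
  induction L with
  | nil => rfl
  | cons kv L ih =>
    simp only [pvPairs, pvLetters, List.flatMap_cons, List.filter_cons, List.filter_append,
      List.map_append] at ih ⊢
    have h1 : ((PySem.Set.ofList kv.2).map (fun c' => (c', kv.1))).filter (fun p => p.1 == c)
        = ((PySem.Set.ofList kv.2).filter (fun c' => c' == c)).map (fun c' => (c', kv.1)) := by
      rw [List.filter_map]; rfl
    rw [h1, ih]
    by_cases h : kv.2.contains c = true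
    · have hmem : c ∈ PySem.Set.ofList kv.2 := by
        rw [PySem.Set.mem_ofList]; exact List.contains_iff_mem.mp h
      have h2 : (PySem.Set.ofList kv.2).filter (fun c' => c' == c) = [c] := by
        rw [List.filter_beq,
            List.count_eq_one_of_mem (PySem.Set.nodup_ofList kv.2) hmem, List.replicate_one]
      simp [h2, List.contains_iff_mem.mp h]
    · have hmem : c ∉ PySem.Set.ofList kv.2 := by
        rw [PySem.Set.mem_ofList]; exact fun hm => h (List.contains_iff_mem.mpr hm)
      have h2 : (PySem.Set.ofList kv.2).filter (fun c' => c' == c) = [] := by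
        rw [List.filter_beq, List.count_eq_zero_of_not_mem hmem, List.replicate_zero]
      simp only [h2, List.map_nil, List.nil_append]
      rw [if_neg h]

-- Index lookup = A's letters list.
theorem pv_index_getD (L : List (String × List String)) (c : String) :
    ((pvPairs L).foldl (fun d p => d.modify p.1 [] (fun l => l ++ [p.2]))
        (PySem.Dict.empty : PySem.Dict String (List String))).getD c []
    = pvLetters L c := by
  rw [PySem.Dict.getD_foldl_modify_append, PySem.Dict.getD_empty, List.nil_append,
      pv_pairs_filter]

-- Index membership = "A's letters list is non-empty".
theorem pv_index_contains (L : List (String × List String)) (c : String) :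
    ((pvPairs L).foldl (fun d p => d.modify p.1 [] (fun l => l ++ [p.2]))
        (PySem.Dict.empty : PySem.Dict String (List String))).contains c
    = !(pvLetters L c).isEmpty := by
  have hkeys : ((pvPairs L).foldl (fun d p => d.modify p.1 [] (fun l => l ++ [p.2]))
        (PySem.Dict.empty : PySem.Dict String (List String))).keys
      = PySem.Set.update (PySem.Dict.empty : PySem.Dict String (List String)).keys
          ((pvPairs L).map Prod.fst) :=
    PySem.Dict.keys_foldl_modify_key (pvPairs L) Prod.fst []
      (fun _ p l => l ++ [p.2]) PySem.Dict.empty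
  rw [Bool.eq_iff_iff]
  constructor
  · intro h
    have hc := (PySem.Dict.contains_iff_mem_keys _ _).mp h
    rw [hkeys] at hc
    have hmemmap : c ∈ (pvPairs L).map Prod.fst := by
      rw [PySem.Set.mem_update] at hc
      rcases hc with h' | h'
      · simp [PySem.Dict.keys_empty] at h'
      · exact h'
    rcases List.mem_map.mp hmemmap with ⟨p, hp, hpc⟩
    rcases List.mem_flatMap.mp hp with ⟨kv, hkv, hpkv⟩
    rcases List.mem_map.mp hpkv with ⟨c', hc', hcc⟩
    have hcont : kv.2.contains c = true := by
      apply List.contains_iff_mem.mpr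
      have hce : c' = c := by rw [← hpc, ← hcc]
      rw [PySem.Set.mem_ofList] at hc'
      exact hce ▸ hc'
    have hmem : kv.1 ∈ pvLetters L c :=
      List.mem_map.mpr ⟨kv, List.mem_filter.mpr ⟨hkv, hcont⟩, rfl⟩
    simpa [List.isEmpty_iff] using List.ne_nil_of_mem hmem
  · intro h
    have hne : pvLetters L c ≠ [] := by
      intro he; rw [he] at h; cases h
    rcases List.exists_mem_of_ne_nil _ hne with ⟨k, hk⟩
    rcases List.mem_map.mp hk with ⟨kv, hkv, hk1⟩
    rcases List.mem_filter.mp hkv with ⟨hkvL, hkvc⟩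
    apply (PySem.Dict.contains_iff_mem_keys _ _).mpr
    rw [hkeys, PySem.Set.mem_update]
    right
    exact List.mem_map.mpr ⟨(c, kv.1),
      List.mem_flatMap.mpr ⟨kv, hkvL,
        List.mem_map.mpr ⟨c, by rw [PySem.Set.mem_ofList]; exact List.contains_iff_mem.mp hkvc, rfl⟩⟩, rfl⟩

-- B's password loop, with the alpha chars dropped, is a fold over A's nonalpha string list.
theorem pv_chars_to_strings (idx : PySem.Dict String (List String)) (l : List Char)
    (d : PySem.Dict String (List String)) :
    l.foldl (fun d a =>
        let as := String.mk [a]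
        if !PySem.Chars.isalpha a && !d.contains as && idx.contains as
          then d.insert as (idx.getD as []) else d) d
    = ((l.filter (fun a => !PySem.Chars.isalpha a)).map (fun a => String.mk [a])).foldl
        (fun d c => if !d.contains c && idx.contains c
          then d.insert c (idx.getD c []) else d) d := by
  induction l generalizing d with
  | nil => rfl
  | cons a l ih =>
    rw [List.foldl_cons, List.filter_cons]
    by_cases h : PySem.Chars.isalpha a = true
    · simp only [h]
      rw [ih]
      simp
    · simp only [Bool.eq_false_iff.mpr h]
      rw [ih]
      simp

-- A conditional "insert once, skip if present" loop builds the dict whose items are the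
-- deduplicated condition-filtered keys paired with their (key-determined) values.
theorem pv_items_foldl_insert_skip (val : String → List String) (q : String → Bool)
    (xs : List String) :
    ((xs.foldl (fun (d : PySem.Dict String (List String)) c =>
        if !d.contains c && q c then d.insert c (val c) else d) PySem.Dict.empty).items)
    = ((PySem.Set.ofList xs).filter q).map (fun c => (c, val c)) := by
  induction xs using List.reverseRecOn with
  | nil => rfl
  | append_singleton xs x ih =>
    rw [List.foldl_append, List.foldl_cons, List.foldl_nil]
    set D := xs.foldl (fun (d : PySem.Dict String (List String)) c =>
        if !d.contains c && q c then d.insert c (val c) else d) PySem.Dict.empty with hD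
    have hkeys : D.keys = (PySem.Set.ofList xs).filter q := by
      rw [PySem.Dict.keys, ih, List.map_map]
      have hcomp : ((fun (p : String × List String) => p.1) ∘ fun c => (c, val c)) = id := rfl
      rw [hcomp, List.map_id]
    have hcont : D.contains x = true ↔ (x ∈ PySem.Set.ofList xs ∧ q x = true) := by
      rw [PySem.Dict.contains_iff_mem_keys, hkeys, List.mem_filter]
    rw [PySem.Set.ofList_append_singleton]
    by_cases hq : q x = true
    · by_cases hm : x ∈ PySem.Set.ofList xs
      · rw [if_neg (by simp [hcont.mpr ⟨hm, hq⟩]), ih, PySem.Set.add_of_mem hm]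
      · have hc : D.contains x = false := by
          rw [Bool.eq_false_iff]; exact fun hcc => hm (hcont.mp hcc).1
        rw [if_pos (by simp [hc, hq]), PySem.Dict.items_insert_of_not_contains D (val x) hc, ih,
            PySem.Set.add_of_not_mem hm, List.filter_append, List.map_append]
        simp [hq]
    · rw [if_neg (by simp [hq]), ih]
      by_cases hm : x ∈ PySem.Set.ofList xs
      · rw [PySem.Set.add_of_mem hm]
      · rw [PySem.Set.add_of_not_mem hm, List.filter_append]
        simp [hq]

-- A's conditional-insert loop (reinsert on duplicates is harmless: same key, same value).
theorem pv_items_foldl_insert_cond (val : String → List String) (q : String → Bool)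
    (xs : List String) :
    ((xs.foldl (fun (d : PySem.Dict String (List String)) c =>
        if q c then d.insert c (val c) else d) PySem.Dict.empty).items)
    = ((PySem.Set.ofList xs).filter q).map (fun c => (c, val c)) := by
  induction xs using List.reverseRecOn with
  | nil => rfl
  | append_singleton xs x ih =>
    rw [List.foldl_append, List.foldl_cons, List.foldl_nil]
    set D := xs.foldl (fun (d : PySem.Dict String (List String)) c =>
        if q c then d.insert c (val c) else d) PySem.Dict.empty with hD
    have hkeys : D.keys = (PySem.Set.ofList xs).filter q := by
      rw [PySem.Dict.keys, ih, List.map_map]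
      have hcomp : ((fun (p : String × List String) => p.1) ∘ fun c => (c, val c)) = id := rfl
      rw [hcomp, List.map_id]
    have hcont : D.contains x = true ↔ (x ∈ PySem.Set.ofList xs ∧ q x = true) := by
      rw [PySem.Dict.contains_iff_mem_keys, hkeys, List.mem_filter]
    rw [PySem.Set.ofList_append_singleton]
    by_cases hq : q x = true
    · rw [if_pos hq]
      by_cases hm : x ∈ PySem.Set.ofList xs
      · have hc : D.contains x = true := hcont.mpr ⟨hm, hq⟩
        rw [PySem.Dict.items_insert_of_contains D (val x) hc, ih, PySem.Set.add_of_mem hm,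
            List.map_map]
        apply List.map_congr_left
        intro c _
        by_cases he : c = x <;> simp [Function.comp, he]
      · have hc : D.contains x = false := by
          rw [Bool.eq_false_iff]; exact fun hcc => hm (hcont.mp hcc).1
        rw [PySem.Dict.items_insert_of_not_contains D (val x) hc, ih,
            PySem.Set.add_of_not_mem hm, List.filter_append, List.map_append]
        simp [hq]
    · rw [if_neg hq, ih]
      by_cases hm : x ∈ PySem.Set.ofList xs
      · rw [PySem.Set.add_of_mem hm]
      · rw [PySem.Set.add_of_not_mem hm, List.filter_append]
        simp [hq]

-- ===== VERDICT (by name: the statement is the Claim_ definition above) =====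
theorem generate_l33t_list_spec : Claim_equal_generate_l33t_list := by
  intro password l33t_list _
  unfold Spec_generate_l33t_list generate_l33t_list generate_l33t_list_alt
  simp only []
  set nonalpha : List String :=
    (password.toList.filter (fun a => !PySem.Chars.isalpha a)).map (fun a => String.mk [a])
    with hna
  -- A side
  have hstepA : (fun (d : PySem.Dict String (List String)) n_a =>
        let letters := (l33t_list.filter (fun kv => kv.2.contains n_a)).map (fun kv => kv.1)
        if letters ≠ [] then d.insert n_a letters else d)
      = (fun (d : PySem.Dict String (List String)) c =>
        if (!(pvLetters l33t_list c).isEmpty) = true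
          then d.insert c (pvLetters l33t_list c) else d) := by
    funext d n_a
    simp only [pvLetters]
    by_cases h : ((l33t_list.filter (fun kv => kv.2.contains n_a)).map (fun kv => kv.1)) = []
    · rw [if_neg (not_not_intro h), if_neg (by rw [h]; simp)]
    · rw [if_pos h, if_pos (by simpa [List.isEmpty_iff] using h)]
  rw [hstepA, pv_items_foldl_insert_cond (pvLetters l33t_list)
      (fun c => !(pvLetters l33t_list c).isEmpty) nonalpha]
  -- B side
  rw [pv_index_eq_pairs_fold, pv_chars_to_strings, ← hna,
      pv_items_foldl_insert_skip
        (fun c => ((pvPairs l33t_list).foldl (fun d p => d.modify p.1 [] (fun l => l ++ [p.2]))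
            (PySem.Dict.empty : PySem.Dict String (List String))).getD c [])
        (fun c => ((pvPairs l33t_list).foldl (fun d p => d.modify p.1 [] (fun l => l ++ [p.2]))
            (PySem.Dict.empty : PySem.Dict String (List String))).contains c) nonalpha]
  have hfil : ((PySem.Set.ofList nonalpha).filter
        (fun c => ((pvPairs l33t_list).foldl (fun d p => d.modify p.1 [] (fun l => l ++ [p.2]))
            (PySem.Dict.empty : PySem.Dict String (List String))).contains c))
      = ((PySem.Set.ofList nonalpha).filter (fun c => !(pvLetters l33t_list c).isEmpty)) := by
    apply List.filter_congr
    intro c _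
    rw [pv_index_contains]
  rw [hfil]
  apply List.map_congr_left
  intro c _
  rw [pv_index_getD]
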